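-- pv_equiv track=rewrite | github.com/Edurle/org-develop | backend/app/services/webhook.py | _event_matches
-- ===== SOURCE A (Python) =====
-- from enum import StrEnum
--
-- class WebhookEvent(StrEnum):
--     """All supported webhook events."""
--
--     # Requirement lifecycle
--     REQUIREMENT_CREATED = "requirement.created"
--     REQUIREMENT_STATUS_CHANGED = "requirement.status_changed"
--
--     # Specification lifecycle
--     SPEC_CREATED = "spec.created"
--     SPEC_SUBMITTED = "spec.submitted"
--     SPEC_LOCKED = "spec.locked"
--     SPEC_REJECTED = "spec.rejected"
--
--     # Task lifecycle
--     TASK_CREATED = "task.created"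
--     TASK_CLAIMED = "task.claimed"
--     TASK_STATUS_CHANGED = "task.status_changed"
--
--     # Test lifecycle
--     TEST_CASE_CREATED = "test_case.created"
--     TEST_CASE_STATUS_CHANGED = "test_case.status_changed"
--
--     # Coverage
--     COVERAGE_INSUFFICIENT = "coverage.insufficient"
--     COVERAGE_SUFFICIENT = "coverage.sufficient"
--
-- def _event_matches(event: WebhookEvent, subscribed: list[str]) -> bool:
--     """Check if an event matches any subscription pattern.
--
--     Supports exact match and wildcard patterns:
--     - "requirement.created" matches exactly
--     - "requirement.*" matches all requirement events
--     - "*" matches everything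
--     """
--     event_str = str(event)
--     for pattern in subscribed:
--         if pattern == "*":
--             return True
--         if pattern == event_str:
--             return True
--         if pattern.endswith(".*"):
--             prefix = pattern[:-1]  # "requirement."
--             if event_str.startswith(prefix):
--                 return True
--     return False
-- ===== SOURCE B (Python) =====
-- def _event_matches(event, subscribed):
--     """Check if an event matches any subscription pattern.
--
--     Instead of testing each pattern against the event, enumerate once the
--     complete set of patterns that could match this event ('*', the event
--     itself, and 'prefix-ending-at-a-dot' + '*'), then test subscriptions
--     by set membership.
--     """
--     event_str = str(event)
--     candidates = {"*", event_str}
--     prefix = ""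
--     for ch in event_str:
--         prefix += ch
--         if ch == ".":
--             candidates.add(prefix + "*")
--     return any(p in candidates for p in subscribed)
-- ===== Notes on version B (the rewrite author's own statement) =====
-- stated objective: alternative
-- what changed: Inverts the matching direction: instead of testing each subscription pattern with a branch cascade (equality / endswith '.*' / startswith prefix), B enumerates once the complete set of patterns that could match the event ('*', the event itself, and each dot-terminated prefix plus '*') and answers by set membership over the subscriptions.
import Mathlib
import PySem

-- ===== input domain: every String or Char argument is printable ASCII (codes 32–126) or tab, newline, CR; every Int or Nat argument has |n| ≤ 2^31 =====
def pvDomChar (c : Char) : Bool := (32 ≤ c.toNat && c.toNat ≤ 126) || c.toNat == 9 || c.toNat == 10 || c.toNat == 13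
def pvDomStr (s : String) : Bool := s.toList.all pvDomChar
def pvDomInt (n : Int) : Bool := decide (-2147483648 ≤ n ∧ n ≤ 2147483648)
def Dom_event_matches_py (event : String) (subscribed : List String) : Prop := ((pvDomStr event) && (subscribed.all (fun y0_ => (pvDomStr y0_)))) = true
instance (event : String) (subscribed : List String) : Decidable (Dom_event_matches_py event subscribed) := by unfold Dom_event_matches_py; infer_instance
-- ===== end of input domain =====

-- B enumerates the event's matching patterns once and tests subscriptions by set membership,
-- instead of A's per-pattern branch cascade (objective: alternative decomposition).

-- ===== PORT A =====
-- the 'for pattern in subscribed' loop with its early returns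
def emA_loop (s : List Char) : List (List Char) → Bool
  | [] => false
  | p :: rest =>
    if p = ['*'] then true
    else if p = s then true
    else if PySem.Chars.endswith p ['.', '*'] then
      -- prefix = pattern[:-1]
      if PySem.Chars.startswith s (PySem.List.slice p none (some (-1))) then true
      else emA_loop s rest
    else emA_loop s rest

def event_matches_py (event : String) (subscribed : List String) : Bool :=
  emA_loop event.toList (subscribed.map String.toList)

-- ===== PORT B =====
-- the 'for ch in event_str' loop: state = (prefix, candidates)
def emB_candidates (s : List Char) : PySem.Set (List Char) :=
  (s.foldl
    (fun st ch =>
      let pre := st.1 ++ [ch]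
      (pre, if ch = '.' then PySem.Set.add st.2 (pre ++ ['*']) else st.2))
    (([] : List Char), PySem.Set.ofList [['*'], s])).2

def event_matches_py_alt (event : String) (subscribed : List String) : Bool :=
  (subscribed.map String.toList).any
    (fun p => PySem.Set.contains (emB_candidates event.toList) p)

-- ===== PRECONDITION & SPEC =====
def Spec_event_matches_py (event : String) (subscribed : List String) (out : Bool) : Prop := out = event_matches_py_alt event subscribed
instance (event : String) (subscribed : List String) (out : Bool) : Decidable (Spec_event_matches_py event subscribed out) := by unfold Spec_event_matches_py; infer_instance

-- ===== CLAIM (what is proved, stated in full; the proofs are below) =====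
def Claim_equal_event_matches_py : Prop := ∀ (event : String) (subscribed : List String), Dom_event_matches_py event subscribed → Spec_event_matches_py event subscribed (event_matches_py event subscribed)

-- ===== LEMMAS AND PROOFS =====

-- A's per-pattern test, as a predicate
def emA_cond (s p : List Char) : Bool :=
  p = ['*'] || p = s ||
    (PySem.Chars.endswith p ['.', '*'] &&
      PySem.Chars.startswith s (PySem.List.slice p none (some (-1))))

theorem emA_loop_eq_any (s : List Char) (l : List (List Char)) :
    emA_loop s l = l.any (emA_cond s) := by
  induction l with
  | nil => rfl
  | cons p rest ih =>
    simp only [emA_loop, emA_cond, List.any_cons]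
    split_ifs <;> simp_all

-- membership in B's candidate fold
theorem mem_emB_fold (l : List Char) (pre : List Char) (c : PySem.Set (List Char))
    (y : List Char) :
    y ∈ (l.foldl
      (fun st ch =>
        let pre := st.1 ++ [ch]
        (pre, if ch = '.' then PySem.Set.add st.2 (pre ++ ['*']) else st.2))
      (pre, c)).2 ↔
    y ∈ c ∨ ∃ i, ∃ h : i < l.length, l[i] = '.' ∧ y = pre ++ l.take (i + 1) ++ ['*'] := by
  induction l generalizing pre c with
  | nil => simp
  | cons ch rest ih =>
    rw [List.foldl_cons]
    by_cases hch : ch = '.'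
    · subst hch
      simp only []
      rw [ih]
      simp only [if_true, PySem.Set.mem_add]
      constructor
      · rintro ((hy | hy) | ⟨i, hi, hdot, hy⟩)
        · exact Or.inl hy
        · exact Or.inr ⟨0, by simp, by simp, by simpa using hy⟩
        · exact Or.inr ⟨i + 1, by simpa using hi, by simpa using hdot, by
            simp [hy, List.take_succ_cons]⟩
      · rintro (hy | ⟨i, hi, hdot, hy⟩)
        · exact Or.inl (Or.inl hy)
        · cases i with
          | zero => exact Or.inl (Or.inr (by simpa using hy))
          | succ j =>
            exact Or.inr ⟨j, by simpa using hi, by simpa using hdot, by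
              simpa [List.take_succ_cons] using hy⟩
    · simp only []
      rw [ih, if_neg hch]
      constructor
      · rintro (hy | ⟨i, hi, hdot, hy⟩)
        · exact Or.inl hy
        · exact Or.inr ⟨i + 1, by simpa using hi, by simpa using hdot, by
            simpa [List.take_succ_cons] using hy⟩
      · rintro (hy | ⟨i, hi, hdot, hy⟩)
        · exact Or.inl hy
        · cases i with
          | zero => exact absurd (by simpa using hdot) hch
          | succ j =>
            exact Or.inr ⟨j, by simpa using hi, by simpa using hdot, by
              simpa [List.take_succ_cons] using hy⟩

theorem mem_emB_candidates (s y : List Char) :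
    y ∈ emB_candidates s ↔
    y = ['*'] ∨ y = s ∨ ∃ i, ∃ h : i < s.length, s[i] = '.' ∧ y = s.take (i + 1) ++ ['*'] := by
  unfold emB_candidates
  rw [mem_emB_fold]
  simp [PySem.Set.mem_ofList, or_assoc]

-- A's wildcard branch matches exactly the dot-prefix candidates
theorem wildcard_iff (s p : List Char) :
    (PySem.Chars.endswith p ['.', '*'] = true ∧
      PySem.Chars.startswith s (PySem.List.slice p none (some (-1))) = true) ↔
    ∃ i, ∃ h : i < s.length, s[i] = '.' ∧ p = s.take (i + 1) ++ ['*'] := by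
  rw [PySem.Chars.endswith_iff, PySem.Chars.startswith_iff, PySem.List.slice_to_neg_one]
  constructor
  · rintro ⟨⟨q, rfl⟩, hpre⟩
    have hq : q ++ ['.', '*'] = (q ++ ['.']) ++ ['*'] := by simp
    rw [hq, List.dropLast_concat] at hpre
    have hlen : q.length + 1 ≤ s.length := by
      simpa using hpre.length_le
    have htake : q ++ ['.'] = s.take (q.length + 1) := by
      simpa using List.prefix_iff_eq_take.mp hpre
    refine ⟨q.length, by omega, ?_, ?_⟩
    · exact (hpre.getElem (by simp)).symm.trans (List.getElem_concat_length rfl (by simp))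
    · rw [hq, htake]
  · rintro ⟨i, hi, hdot, rfl⟩
    have ht : s.take (i + 1) = s.take i ++ ['.'] := by
      rw [List.take_succ_eq_append_getElem hi, hdot]
    constructor
    · rw [ht, List.append_assoc]
      exact List.suffix_append _ _
    · rw [List.dropLast_concat]
      exact List.take_prefix _ _

theorem cond_iff_mem (s p : List Char) :
    emA_cond s p = true ↔ p ∈ emB_candidates s := by
  rw [mem_emB_candidates]
  simp only [emA_cond, Bool.or_eq_true, Bool.and_eq_true, decide_eq_true_eq]
  rw [or_assoc]
  exact or_congr_right (or_congr_right (wildcard_iff s p))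

-- ===== VERDICT (by name: the statement is the Claim_ definition above) =====
theorem event_matches_py_spec : Claim_equal_event_matches_py := by
  intro event subscribed _
  unfold Spec_event_matches_py event_matches_py event_matches_py_alt
  rw [emA_loop_eq_any]
  refine List.any_congr rfl (fun p => ?_)
  have h := cond_iff_mem event.toList p
  rw [← PySem.Set.contains_iff] at h
  exact Bool.eq_iff_iff.mpr h
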